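-- pv_equiv track=rewrite | github.com/AnnanShu/LeetCode | KMP_stringSearch/kmp.py | build
-- ===== SOURCE A (Python) =====
-- from typing import List
--
-- def build(p: str) -> List[int]:
--     m = len(p)
--     nxt = [0, 0]
--     j = 0
--     for i in range(1, m):
--         while j > 0 and p[i] != p[j]:
--             j = nxt[j]
--         if p[i] == p[j]:
--             j += 1
--         nxt.append(j)
--     return nxt
-- ===== SOURCE B (Python) =====
-- def build(p):
--     m = len(p)
--     res = [0, 0]
--     for i in range(1, m):
--         k = i
--         while k > 0 and p[:k] != p[i + 1 - k:i + 1]: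
--             k -= 1
--         res.append(k)
--     return res
-- ===== Notes on version B (the rewrite author's own statement) =====
-- stated objective: simpler
-- what changed: Replaces KMP's failure-link chasing (an inner while loop that follows entries of the table built so far) by a direct per-position downward search for the longest proper border of each prefix via slice comparison, so no failure links are stored or consulted.
import Mathlib
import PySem

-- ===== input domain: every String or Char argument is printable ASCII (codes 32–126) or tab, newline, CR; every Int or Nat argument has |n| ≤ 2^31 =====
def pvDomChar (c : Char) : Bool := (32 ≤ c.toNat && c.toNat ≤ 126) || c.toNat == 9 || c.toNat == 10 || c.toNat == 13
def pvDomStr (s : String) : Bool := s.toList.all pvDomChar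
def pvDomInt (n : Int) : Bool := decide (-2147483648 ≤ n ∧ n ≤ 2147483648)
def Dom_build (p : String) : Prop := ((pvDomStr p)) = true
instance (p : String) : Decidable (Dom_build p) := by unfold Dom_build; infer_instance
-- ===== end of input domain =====

-- B replaces KMP's failure-link chasing by a direct downward search for each prefix's
-- longest proper border (simpler/plainer, not faster); proved to return A's exact table.

-- ===== PORT A =====
-- inner `while j > 0 and p[i] != p[j]: j = nxt[j]`; fuel bounds the iterations
-- (j strictly decreases each step, fuel = i always suffices — proved in the lemmas below).
-- Indices are always in range in A (0 ≤ j < i < len p), so getD/toNat are exact here.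
def buildWhile (l : List Char) (nxt : List Int) (i : Nat) : Nat → Int → Int
  | 0, j => j
  | fuel+1, j =>
    if 0 < j ∧ l.getD i ' ' ≠ l.getD j.toNat ' ' then
      buildWhile l nxt i fuel (nxt.getD j.toNat 0)
    else j

-- one iteration of A's `for i in range(1, m)` body, state = (nxt, j)
def buildStep (l : List Char) (st : List Int × Int) (i : Nat) : List Int × Int :=
  let j1 := buildWhile l st.1 i i st.2
  let j2 := if l.getD i ' ' = l.getD j1.toNat ' ' then j1 + 1 else j1
  (st.1 ++ [j2], j2)

def build (p : String) : List Int :=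
  ((List.range' 1 (p.toList.length - 1)).foldl (buildStep p.toList) ([0, 0], 0)).1

-- ===== PORT B =====
-- inner `while k > 0 and p[:k] != p[i+1-k:i+1]: k -= 1`; the slices are in range
-- (0 ≤ i+1-k ≤ i+1 ≤ len p), so take/drop are exact.
def borLoop (l : List Char) (i : Nat) : Nat → Nat
  | 0 => 0
  | k+1 => if l.take (k+1) ≠ (l.take (i+1)).drop (i - k) then borLoop l i k else k + 1

def build_alt (p : String) : List Int :=
  (List.range' 1 (p.toList.length - 1)).foldl
    (fun res i => res ++ [((borLoop p.toList i i : Nat) : Int)]) [0, 0]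

-- ===== PRECONDITION & SPEC =====
def Spec_build (p : String) (out : List Int) : Prop := out = build_alt p
instance (p : String) (out : List Int) : Decidable (Spec_build p out) := by unfold Spec_build; infer_instance

-- ===== CLAIM (what is proved, stated in full; the proofs are below) =====
def Claim_equal_build : Prop := ∀ (p : String), Dom_build p → Spec_build p (build p)

-- ===== LEMMAS AND PROOFS =====

-- k is a proper border of s: a strict prefix of s that is also a suffix of s
def pvIsBorder (s : List Char) (k : Nat) : Bool :=
  decide (k < s.length) && (s.take k == s.drop (s.length - k))

-- longest proper border length of s (0 for s = [])
def pvMB (s : List Char) : Nat :=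
  Nat.findGreatest (fun k => pvIsBorder s k = true) (s.length - 1)

theorem pvIsBorder_iff (s : List Char) (k : Nat) :
    pvIsBorder s k = true ↔ (k < s.length ∧ s.take k = s.drop (s.length - k)) := by
  simp [pvIsBorder]

theorem pvIsBorder_zero (s : List Char) (h : 0 < s.length) : pvIsBorder s 0 = true := by
  rw [pvIsBorder_iff]; simp [h]

theorem pvMB_isBorder (s : List Char) (h : 0 < s.length) : pvIsBorder s (pvMB s) = true := by
  rcases Nat.eq_zero_or_pos (pvMB s) with h0 | h0
  · rw [h0]; exact pvIsBorder_zero s h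
  · exact Nat.findGreatest_spec (P := fun k => pvIsBorder s k = true) (m := 0)
      (Nat.zero_le _) (pvIsBorder_zero s h)

theorem pvMB_max (s : List Char) (b : Nat) (hb : pvIsBorder s b = true) : b ≤ pvMB s := by
  have hlt : b < s.length := ((pvIsBorder_iff s b).1 hb).1
  exact Nat.le_findGreatest (by omega) hb

theorem pvMB_lt (s : List Char) (h : 0 < s.length) : pvMB s < s.length := by
  have := Nat.findGreatest_le (P := fun k => pvIsBorder s k = true) (n := s.length - 1)
  unfold pvMB
  omega

-- a border of a border is a border
theorem pvBorder_trans (s : List Char) (c b : Nat)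
    (hc : pvIsBorder s c = true) (hb : pvIsBorder (s.take c) b = true) :
    pvIsBorder s b = true := by
  rw [pvIsBorder_iff] at *
  obtain ⟨hc1, hc2⟩ := hc
  obtain ⟨hb1, hb2⟩ := hb
  have hlen : (s.take c).length = c := by simp; omega
  rw [hlen] at hb1 hb2
  constructor
  · omega
  · have h1 : s.take b = (s.take c).take b := by rw [List.take_take]; congr 1; omega
    rw [h1, hb2, hc2, List.drop_drop]
    congr 1; omega

-- two nested borders: the smaller is a border of the larger
theorem pvBorder_nest (s : List Char) (b c : Nat)
    (hb : pvIsBorder s b = true) (hc : pvIsBorder s c = true) (hbc : b < c) :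
    pvIsBorder (s.take c) b = true := by
  rw [pvIsBorder_iff] at *
  obtain ⟨hb1, hb2⟩ := hb
  obtain ⟨hc1, hc2⟩ := hc
  have hlen : (s.take c).length = c := by simp; omega
  rw [hlen]
  refine ⟨hbc, ?_⟩
  have h1 : (s.take c).take b = s.take b := by rw [List.take_take]; congr 1; omega
  rw [h1, hc2, List.drop_drop, hb2]
  congr 1; omega

-- extending a border by one matching character
theorem pvBorder_succ (s : List Char) (c : Char) (k : Nat) :
    pvIsBorder (s ++ [c]) (k+1) = true ↔
    (pvIsBorder s k = true ∧ s.getD k ' ' = c) := by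
  rw [pvIsBorder_iff, pvIsBorder_iff]
  constructor
  · rintro ⟨h1, h2⟩
    have hk : k < s.length := by simp at h1; omega
    rw [List.take_append_of_le_length (by omega),
        show (s ++ [c]).length - (k+1) = s.length - k by simp,
        List.drop_append_of_le_length (by omega),
        ← List.take_concat_get hk, List.concat_eq_append] at h2
    obtain ⟨e1, e2⟩ := List.append_inj' h2 (by simp)
    refine ⟨⟨hk, e1⟩, ?_⟩
    simp only [List.cons.injEq] at e2
    rw [List.getD_eq_getElem?_getD, List.getElem?_eq_getElem hk]
    simpa using e2.1
  · rintro ⟨⟨hk, hb⟩, hc⟩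
    refine ⟨by simp; omega, ?_⟩
    rw [List.take_append_of_le_length (by omega),
        show (s ++ [c]).length - (k+1) = s.length - k by simp,
        List.drop_append_of_le_length (by omega),
        ← List.take_concat_get hk, List.concat_eq_append, hb]
    congr 1
    rw [List.getD_eq_getElem?_getD, List.getElem?_eq_getElem hk] at hc
    simp at hc
    simp [hc]

-- the B-side inner loop computes Nat.findGreatest of the border predicate
theorem borLoop_eq (l : List Char) (i : Nat) (hi : i < l.length) :
    ∀ n, n ≤ i → borLoop l i n = Nat.findGreatest (fun k => pvIsBorder (l.take (i+1)) k = true) n := by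
  intro n
  induction n with
  | zero => intro _; rfl
  | succ k ih =>
    intro hk
    have hPiff : pvIsBorder (l.take (i+1)) (k+1) = true ↔
        l.take (k+1) = (l.take (i+1)).drop (i - k) := by
      rw [pvIsBorder_iff]
      have hlen : (l.take (i+1)).length = i + 1 := by rw [List.length_take]; omega
      have htt : (l.take (i+1)).take (k+1) = l.take (k+1) := by
        rw [List.take_take]; congr 1; omega
      rw [hlen, htt, show i + 1 - (k+1) = i - k by omega]
      constructor
      · rintro ⟨_, h⟩; exact h
      · intro h; exact ⟨by omega, h⟩
    rw [borLoop, Nat.findGreatest_succ]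
    by_cases h : l.take (k+1) = (l.take (i+1)).drop (i - k)
    · rw [if_neg (by simpa using h), if_pos (hPiff.2 h)]
    · rw [if_pos (by simpa using h), if_neg (fun hP => h (hPiff.1 hP)), ih (by omega)]

-- the table [0,0] ++ [mb(take 2), …, mb(take (n+1))]
def pvNxt (l : List Char) (n : Nat) : List Int :=
  [0, 0] ++ (List.range' 1 n).map (fun i => ((pvMB (l.take (i+1)) : Nat) : Int))

theorem pvNxt_length (l : List Char) (n : Nat) : (pvNxt l n).length = n + 2 := by
  simp [pvNxt]

theorem pvNxt_concat (l : List Char) (n : Nat) :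
    pvNxt l (n+1) = pvNxt l n ++ [((pvMB (l.take (n+2)) : Nat) : Int)] := by
  simp [pvNxt, List.range'_concat]
  rw [show 1 + n + 1 = n + 2 by omega]

theorem pvMB_take_one (l : List Char) (h : 1 ≤ l.length) : pvMB (l.take 1) = 0 := by
  unfold pvMB
  have : (l.take 1).length = 1 := by simp; omega
  rw [this]
  exact Nat.findGreatest_zero

theorem pvNxt_getD (l : List Char) (hm : 1 ≤ l.length) :
    ∀ n t, 1 ≤ t → t ≤ n + 1 → (pvNxt l n).getD t 0 = ((pvMB (l.take t) : Nat) : Int) := by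
  intro n
  induction n with
  | zero =>
    intro t h1 h2
    have ht : t = 1 := by omega
    subst ht
    simp [pvNxt, pvMB_take_one l hm]
  | succ n ih =>
    intro t h1 h2
    rw [pvNxt_concat]
    by_cases h : t ≤ n + 1
    · rw [List.getD_append _ _ _ _ (by rw [pvNxt_length]; omega)]
      exact ih t h1 h
    · have ht : t = n + 2 := by omega
      subst ht
      rw [List.getD_eq_getElem?_getD,
          List.getElem?_append_right (by rw [pvNxt_length])]
      simp [pvNxt_length]

-- the A-side inner while loop descends the border chain
theorem buildWhile_spec (l : List Char) (nxt : List Int) (i : Nat)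
    (_hi1 : 1 ≤ i) (hi : i < l.length)
    (HT : ∀ t, 1 ≤ t → t ≤ i → nxt.getD t 0 = ((pvMB (l.take t) : Nat) : Int)) :
    ∀ fuel j, j ≤ fuel → pvIsBorder (l.take i) j = true →
      (∀ b, pvIsBorder (l.take i) b = true → l.getD b ' ' = l.getD i ' ' → b ≤ j) →
      ∃ r : Nat, buildWhile l nxt i fuel (j : Int) = (r : Int) ∧
        pvIsBorder (l.take i) r = true ∧
        (∀ b, pvIsBorder (l.take i) b = true → l.getD b ' ' = l.getD i ' ' → b ≤ r) ∧
        (l.getD r ' ' = l.getD i ' ' ∨ r = 0) := by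
  intro fuel
  induction fuel with
  | zero =>
    intro j hj hb hmax
    have hj0 : j = 0 := by omega
    subst hj0
    exact ⟨0, rfl, hb, hmax, Or.inr rfl⟩
  | succ fuel ih =>
    intro j hj hb hmax
    rw [buildWhile]
    by_cases hcase : 0 < ((j : Nat) : Int) ∧ l.getD i ' ' ≠ l.getD ((j : Nat) : Int).toNat ' '
    · rw [if_pos hcase]
      obtain ⟨hj0, hne⟩ := hcase
      have hj0' : 0 < j := by exact_mod_cast hj0
      rw [Int.toNat_natCast] at hne
      have hjlt : j < i := by
        have h2 := ((pvIsBorder_iff _ _).1 hb).1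
        rw [List.length_take] at h2
        omega
      rw [Int.toNat_natCast, HT j hj0' (by omega)]
      have hlenj : (l.take j).length = j := by rw [List.length_take]; omega
      have hj1lt : pvMB (l.take j) < j := by
        have := pvMB_lt (l.take j) (by omega)
        omega
      have htakej : (l.take i).take j = l.take j := by
        rw [List.take_take]; congr 1; omega
      have hbj1 : pvIsBorder (l.take i) (pvMB (l.take j)) = true := by
        apply pvBorder_trans (l.take i) j (pvMB (l.take j)) hb
        rw [htakej]
        exact pvMB_isBorder _ (by omega)
      have hmax1 : ∀ b, pvIsBorder (l.take i) b = true →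
          l.getD b ' ' = l.getD i ' ' → b ≤ pvMB (l.take j) := by
        intro b hbb hcb
        have hble : b ≤ j := hmax b hbb hcb
        have hbne : b ≠ j := by rintro rfl; exact hne hcb.symm
        have hnest := pvBorder_nest (l.take i) b j hbb hb (by omega)
        rw [htakej] at hnest
        exact pvMB_max _ _ hnest
      exact ih (pvMB (l.take j)) (by omega) hbj1 hmax1
    · rw [if_neg hcase]
      refine ⟨j, rfl, hb, hmax, ?_⟩
      push Not at hcase
      rcases Nat.eq_zero_or_pos j with h0 | h0
      · exact Or.inr h0
      · left
        have := hcase (by exact_mod_cast h0)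
        rw [Int.toNat_natCast] at this
        exact this.symm

-- one full iteration of A's loop maps mb(take i) to mb(take (i+1))
theorem buildStep_spec (l : List Char) (nxt : List Int) (i : Nat)
    (hi1 : 1 ≤ i) (hi : i < l.length)
    (HT : ∀ t, 1 ≤ t → t ≤ i → nxt.getD t 0 = ((pvMB (l.take t) : Nat) : Int)) :
    (if l.getD i ' ' = l.getD (buildWhile l nxt i i ((pvMB (l.take i) : Nat) : Int)).toNat ' '
     then buildWhile l nxt i i ((pvMB (l.take i) : Nat) : Int) + 1
     else buildWhile l nxt i i ((pvMB (l.take i) : Nat) : Int))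
      = ((pvMB (l.take (i+1)) : Nat) : Int) := by
  have hleni : (l.take i).length = i := by rw [List.length_take]; omega
  have hmb_lt : pvMB (l.take i) < i := by
    have := pvMB_lt (l.take i) (by omega); omega
  obtain ⟨r, hr, hbr, hmaxr, hstop⟩ :=
    buildWhile_spec l nxt i hi1 hi HT i (pvMB (l.take i)) (by omega)
      (pvMB_isBorder _ (by omega)) (fun b hbb _ => pvMB_max _ _ hbb)
  rw [hr, Int.toNat_natCast]
  have hrlt : r < i := by
    have := ((pvIsBorder_iff _ _).1 hbr).1
    rw [List.length_take] at this; omega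
  have hsucc : l.take (i+1) = l.take i ++ [l.getD i ' '] := by
    rw [← List.take_concat_get hi, List.concat_eq_append]
    congr 1
    rw [List.getD_eq_getElem?_getD, List.getElem?_eq_getElem hi]
    rfl
  have hlen1 : (l.take (i+1)).length = i + 1 := by rw [List.length_take]; omega
  have hgetD_take : ∀ b, b < i → (l.take i).getD b ' ' = l.getD b ' ' := by
    intro b hblt
    rw [List.getD_eq_getElem?_getD, List.getD_eq_getElem?_getD, List.getElem?_take,
      if_pos hblt]
  by_cases hc : l.getD i ' ' = l.getD r ' '
  · rw [if_pos hc]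
    have hr1 : pvIsBorder (l.take (i+1)) (r+1) = true := by
      rw [hsucc, pvBorder_succ]
      exact ⟨hbr, by rw [hgetD_take r hrlt, ← hc]⟩
    have hle1 : r + 1 ≤ pvMB (l.take (i+1)) := pvMB_max _ _ hr1
    have hge1 : pvMB (l.take (i+1)) ≤ r + 1 := by
      have hqb : pvIsBorder (l.take (i+1)) (pvMB (l.take (i+1))) = true :=
        pvMB_isBorder _ (by omega)
      rcases hq : pvMB (l.take (i+1)) with _ | k
      · omega
      · rw [hq, hsucc, pvBorder_succ] at hqb
        obtain ⟨hkb, hkc⟩ := hqb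
        have hklt : k < i := by
          have := ((pvIsBorder_iff _ _).1 hkb).1
          rw [List.length_take] at this; omega
        have hkc' : l.getD k ' ' = l.getD i ' ' := by
          rw [← hgetD_take k hklt]; exact hkc
        have := hmaxr k hkb hkc'
        omega
    have heq : pvMB (l.take (i+1)) = r + 1 := le_antisymm hge1 hle1
    rw [heq]
    push_cast
    ring
  · rw [if_neg hc]
    have hr0 : r = 0 := by
      rcases hstop with h | h
      · exact absurd h.symm hc
      · exact h
    subst hr0
    have hz : pvMB (l.take (i+1)) = 0 := by
      have hqb : pvIsBorder (l.take (i+1)) (pvMB (l.take (i+1))) = true :=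
        pvMB_isBorder _ (by omega)
      rcases hq : pvMB (l.take (i+1)) with _ | k
      · rfl
      · rw [hq, hsucc, pvBorder_succ] at hqb
        obtain ⟨hkb, hkc⟩ := hqb
        have hklt : k < i := by
          have := ((pvIsBorder_iff _ _).1 hkb).1
          rw [List.length_take] at this; omega
        have hkc' : l.getD k ' ' = l.getD i ' ' := by
          rw [← hgetD_take k hklt]; exact hkc
        have hk0 : k = 0 := by have := hmaxr k hkb hkc'; omega
        subst hk0
        exact absurd hkc'.symm hc
    rw [hz]

theorem build_invariant (l : List Char) (hm : 1 ≤ l.length) :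
    ∀ n, n + 1 ≤ l.length →
      (List.range' 1 n).foldl (buildStep l) ([0, 0], 0)
        = (pvNxt l n, ((pvMB (l.take (n+1)) : Nat) : Int)) := by
  intro n
  induction n with
  | zero =>
    intro _
    simp [pvNxt, pvMB_take_one l hm]
  | succ n ih =>
    intro h
    rw [List.range'_concat, List.foldl_append, ih (by omega)]
    simp only [List.foldl_cons, List.foldl_nil]
    rw [show 1 + 1 * n = n + 1 by omega]
    have HT : ∀ t, 1 ≤ t → t ≤ n + 1 →
        (pvNxt l n).getD t 0 = ((pvMB (l.take t) : Nat) : Int) :=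
      fun t h1 h2 => pvNxt_getD l hm n t h1 h2
    have hstep := buildStep_spec l (pvNxt l n) (n+1) (by omega) (by omega) HT
    show (pvNxt l n ++ [_], _) = _
    rw [pvNxt_concat]
    refine Prod.ext ?_ ?_ <;> simp only []
    · congr 1
      simp only [List.cons.injEq, and_true]
      rw [show n + 1 + 1 = n + 2 from rfl] at hstep
      exact hstep
    · rw [show n + 1 + 1 = n + 2 from rfl] at hstep
      exact hstep

theorem foldl_append_map (g : Nat → Int) :
    ∀ (xs : List Nat) (init : List Int),
      xs.foldl (fun res i => res ++ [g i]) init = init ++ xs.map g := by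
  intro xs
  induction xs with
  | nil => intro init; simp
  | cons x xs ih => intro init; simp [List.foldl_cons, ih]

theorem build_eq_alt (p : String) : build p = build_alt p := by
  unfold build build_alt
  rw [foldl_append_map (fun i => ((borLoop p.toList i i : Nat) : Int))]
  rcases Nat.eq_zero_or_pos p.toList.length with h0 | h0
  · rw [h0]
    rfl
  · rw [build_invariant p.toList h0 (p.toList.length - 1) (by omega)]
    unfold pvNxt
    simp only []
    congr 1
    apply List.map_congr_left
    intro i hi2
    rw [List.mem_range'_1] at hi2
    have hii : i < p.toList.length := by omega
    rw [borLoop_eq p.toList i hii i le_rfl]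
    congr 1
    unfold pvMB
    congr 1
    rw [List.length_take]
    omega

-- ===== VERDICT (by name: the statement is the Claim_ definition above) =====
theorem build_spec : Claim_equal_build := by
  intro p _
  unfold Spec_build
  exact build_eq_alt p
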